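-- pv_equiv track=rewrite | github.com/delatawer/Prediction_NBAfinals_Game5 | NBA_ML.py | tokenize_names
-- ===== SOURCE A (Python) =====
-- def tokenize_names(dict, names):
--     cont = 0
--     cont2 = 0
--     for team in names:
--         if team in dict:
--             pass
--         else:
--             dict[team] = cont
--             cont += 1
--         names[cont2] = dict[team]
--         cont2 += 1
--     return dict, names
-- ===== SOURCE B (Python) =====
-- def tokenize_names(dict, names):
--     # Two passes: build the vocabulary first, then encode.
--     cont = 0
--     for team in names:
--         if team not in dict:
--             dict[team] = cont
--             cont += 1
--     for i in range(len(names)):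
--         names[i] = dict[names[i]]
--     return dict, names
-- ===== Notes on version B (the rewrite author's own statement) =====
-- stated objective: alternative
-- what changed: A tokenizes in one fused loop (membership test, conditional insert, and in-place encode per element); B separates this into two passes: first build the vocabulary with a new-insertion counter, then overwrite every names[i] by its token from the finished table.
import Mathlib
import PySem

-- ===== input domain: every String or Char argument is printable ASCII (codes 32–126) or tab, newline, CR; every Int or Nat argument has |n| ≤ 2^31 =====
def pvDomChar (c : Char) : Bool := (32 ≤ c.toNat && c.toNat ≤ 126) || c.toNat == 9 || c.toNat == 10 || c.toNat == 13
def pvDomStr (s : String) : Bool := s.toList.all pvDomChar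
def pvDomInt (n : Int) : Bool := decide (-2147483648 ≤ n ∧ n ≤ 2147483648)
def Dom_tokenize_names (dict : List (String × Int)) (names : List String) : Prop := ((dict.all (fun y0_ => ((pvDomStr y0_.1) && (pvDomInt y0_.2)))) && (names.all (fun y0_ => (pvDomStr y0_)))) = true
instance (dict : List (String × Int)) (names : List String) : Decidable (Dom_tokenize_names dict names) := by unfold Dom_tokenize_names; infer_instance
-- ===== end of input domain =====

-- B separates A's fused loop into two passes (build the vocabulary, then encode); same cost, different decomposition.
-- Both Pythons mutate `dict` and `names` in place identically; the equivalence proved here is about the return value.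

-- ===== PORT A =====
-- one fused loop: membership test, conditional insert with a fresh-token counter, then encode in place
def tokAStep (st : PySem.Dict String Int × Int × List Int) (team : String) :
    PySem.Dict String Int × Int × List Int :=
  match st with
  | (d, cont, out) =>
    if d.contains team then
      (d, cont, out ++ [d.getD team 0])
    else
      (d.insert team cont, cont + 1, out ++ [(d.insert team cont).getD team 0])

def tokenize_names (dict : List (String × Int)) (names : List String) : (List (String × Int)) × List Int :=
  let fin := names.foldl tokAStep (PySem.Dict.mk dict, 0, [])
  (fin.1.items, fin.2.2)

-- ===== PORT B =====
-- first pass: build the vocabulary with a counter of new insertions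
def buildVocab : PySem.Dict String Int → Int → List String → PySem.Dict String Int
  | d, _, [] => d
  | d, cont, t :: ts =>
    if d.contains t then buildVocab d cont ts
    else buildVocab (d.insert t cont) (cont + 1) ts

-- second pass: names[i] = dict[names[i]] for each index
def tokenize_names_alt (dict : List (String × Int)) (names : List String) : (List (String × Int)) × List Int :=
  let d := buildVocab (PySem.Dict.mk dict) 0 names
  (d.items, names.map (fun t => d.getD t 0))

-- ===== PRECONDITION & SPEC =====
def Spec_tokenize_names (dict : List (String × Int)) (names : List String) (out : (List (String × Int)) × List Int) : Prop := out = tokenize_names_alt dict names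
instance (dict : List (String × Int)) (names : List String) (out : (List (String × Int)) × List Int) : Decidable (Spec_tokenize_names dict names out) := by unfold Spec_tokenize_names; infer_instance

-- ===== CLAIM (what is proved, stated in full; the proofs are below) =====
def Claim_equal_tokenize_names : Prop := ∀ (dict : List (String × Int)) (names : List String), Dom_tokenize_names dict names → Spec_tokenize_names dict names (tokenize_names dict names)

-- ===== LEMMAS AND PROOFS =====

-- buildVocab never changes the value of a key already present
lemma buildVocab_getD_of_contains (names : List String) :
    ∀ (d : PySem.Dict String Int) (cont : Int) (t : String), d.contains t = true →
      (buildVocab d cont names).getD t 0 = d.getD t 0 := by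
  induction names with
  | nil => intro d cont t _; rfl
  | cons x xs ih =>
    intro d cont t ht
    by_cases hx : d.contains x = true
    · simp [buildVocab, hx, ih d cont t ht]
    · have hne : t ≠ x := by intro h; exact hx (h ▸ ht)
      have ht' : (d.insert x cont).contains t = true := by
        simp [PySem.Dict.contains_insert, ht]
      simp only [buildVocab, hx, Bool.false_eq_true, if_false]
      rw [ih _ _ t ht', PySem.Dict.getD_insert_of_ne (hne := hne)]

-- A's fused fold equals B's two passes, for every starting state
lemma fold_eq_two_pass (names : List String) :
    ∀ (d : PySem.Dict String Int) (cont : Int) (out : List Int),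
      ∃ c, names.foldl tokAStep (d, cont, out) =
        (buildVocab d cont names, c,
         out ++ names.map (fun t => (buildVocab d cont names).getD t 0)) := by
  induction names with
  | nil => intro d cont out; exact ⟨cont, by simp [buildVocab]⟩
  | cons x xs ih =>
    intro d cont out
    by_cases hx : d.contains x = true
    · obtain ⟨c, hc⟩ := ih d cont (out ++ [d.getD x 0])
      refine ⟨c, ?_⟩
      simp only [List.foldl_cons, tokAStep, hx, if_true, buildVocab, List.map_cons]
      rw [hc, buildVocab_getD_of_contains xs d cont x hx]
      simp
    · obtain ⟨c, hc⟩ := ih (d.insert x cont) (cont + 1) (out ++ [(d.insert x cont).getD x 0])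
      refine ⟨c, ?_⟩
      simp only [List.foldl_cons, tokAStep, hx, Bool.false_eq_true, if_false, buildVocab, List.map_cons]
      rw [hc, buildVocab_getD_of_contains xs (d.insert x cont) (cont + 1) x
            (by simp [pysem])]
      simp

-- ===== VERDICT (by name: the statement is the Claim_ definition above) =====
theorem tokenize_names_spec : Claim_equal_tokenize_names := by
  intro dict names _
  unfold Spec_tokenize_names tokenize_names tokenize_names_alt
  obtain ⟨c, hc⟩ := fold_eq_two_pass names (PySem.Dict.mk dict) 0 []
  simp [hc]
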